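-- pv_equiv track=rewrite | github.com/112224/algorithm | python3/4803 트리.py | solve
-- ===== SOURCE A (Python) =====
-- def find(pare, change, c):
--     change.add(c)
--     if pare[c] == c or pare[c] == -1:
--         return pare[c]
--     return find(pare, change, pare[c])
--
-- def solve(n, edges):
--     pare = [i for i in range(n)]
--
--     for a, b in edges:
--         change = set()
--         pa = find(pare, change, a-1)
--         pb = find(pare, change, b-1)
--         val = -1 if pa == -1 or pb == -1 or pa == pb else pa
--         for ele in change:
--             pare[ele] = val
--
--
--     ret = 0
--     for i in range(n):
--         if i == pare[i]:
--             ret += 1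
--     return ret
-- ===== SOURCE B (Python) =====
-- def solve(n, edges):
--     # Flat component labels: comp[i] is the representative of i's component, or -1 if the
--     # component contains a cycle. Each edge is one scan + a full relabel, no recursion.
--     comp = list(range(n))
--     for a, b in edges:
--         pa = comp[a-1]
--         pb = comp[b-1]
--         val = -1 if pa == -1 or pb == -1 or pa == pb else pa
--         comp = [val if c == pa or c == pb else c for c in comp]
--     return sum(1 for i in range(n) if comp[i] == i)
-- ===== Notes on version B (the rewrite author's own statement) =====
-- stated objective: alternative
-- what changed: A's recursive union-find (parent pointers, per-edge path collection into a change set, cycle marking with -1) is replaced by a flat component-label list: each edge reads the two labels directly and rewrites every label of the two merged components in one comprehension, and the recursive find disappears entirely.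
import Mathlib
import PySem

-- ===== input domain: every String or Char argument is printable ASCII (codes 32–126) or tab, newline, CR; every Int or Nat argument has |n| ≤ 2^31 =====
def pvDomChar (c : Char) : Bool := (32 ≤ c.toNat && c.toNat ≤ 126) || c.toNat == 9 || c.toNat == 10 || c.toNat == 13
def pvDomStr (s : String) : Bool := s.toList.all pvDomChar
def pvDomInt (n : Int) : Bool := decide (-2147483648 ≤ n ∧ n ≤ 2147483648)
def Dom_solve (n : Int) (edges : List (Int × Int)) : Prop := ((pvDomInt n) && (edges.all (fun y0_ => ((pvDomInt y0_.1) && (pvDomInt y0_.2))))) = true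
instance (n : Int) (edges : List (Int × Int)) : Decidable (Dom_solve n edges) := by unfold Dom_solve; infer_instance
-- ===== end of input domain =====

-- B replaces A's recursive union-find (parent pointers, path collection, cycle mark -1) by a
-- flat component-label array rewritten per edge: same return value, different decomposition
-- (objective: alternative).  A mutates no argument; both only return a count.

-- ===== PORT A =====
-- Python lists are arrays: both ports keep their state in Array Int (O(1) indexing, as in
-- CPython).  pyAGet/pyASet are xs[i] / xs[i] = v with Python's negative-index rule; where
-- Python raises IndexError they return 0 / leave xs unchanged — those inputs are excluded
-- by Pre_solve.
def pyAGet (xs : Array Int) (i : Int) : Int :=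
  if 0 ≤ i then (xs[i.toNat]?).getD 0
  else if -(xs.size : Int) ≤ i then (xs[xs.size - (-i).toNat]?).getD 0
  else 0

def pyASet (xs : Array Int) (i : Int) (v : Int) : Array Int :=
  if 0 ≤ i then if i < (xs.size : Int) then xs.setIfInBounds i.toNat v else xs
  else if -(xs.size : Int) ≤ i then xs.setIfInBounds (xs.size - (-i).toNat) v
  else xs

-- Python `find`: recursion ported with explicit fuel (the caller passes pare.size + 1, which
-- the proofs show is never exhausted on reachable states); fuel 0 returns a junk value, unreachable.
def findA : Nat → Array Int → List Int → Int → List Int × Int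
  | 0, _, change, _ => (change, 0)
  | fuel+1, pare, change, c =>
    let change' := PySem.Set.add change c
    let p := pyAGet pare c
    if p = c ∨ p = -1 then (change', p)
    else findA fuel pare change' p

def solve (n : Int) (edges : List (Int × Int)) : Int :=
  let pare := edges.foldl (fun pare ab =>
    let r1 := findA (pare.size + 1) pare PySem.Set.empty (ab.1 - 1)
    let r2 := findA (pare.size + 1) pare r1.1 (ab.2 - 1)
    let pa := r1.2
    let pb := r2.2
    let val : Int := if pa = -1 ∨ pb = -1 ∨ pa = pb then -1 else pa
    r2.1.foldl (fun pr ele => pyASet pr ele val) pare)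
    (PySem.List.pyRange 0 n 1).toArray
  (PySem.List.pyRange 0 n 1).foldl
    (fun ret i => if i = pyAGet pare i then ret + 1 else ret) 0

-- ===== PORT B =====
def solve_alt (n : Int) (edges : List (Int × Int)) : Int :=
  let comp := edges.foldl (fun comp ab =>
    let pa := pyAGet comp (ab.1 - 1)
    let pb := pyAGet comp (ab.2 - 1)
    let val : Int := if pa = -1 ∨ pb = -1 ∨ pa = pb then -1 else pa
    comp.map (fun c => if c = pa ∨ c = pb then val else c))
    (PySem.List.pyRange 0 n 1).toArray
  (PySem.List.pyRange 0 n 1).foldl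
    (fun acc i => if pyAGet comp i = i then acc + 1 else acc) 0

-- ===== PRECONDITION & SPEC =====
-- Pre_solve: every edge endpoint indexes pare/comp in range (Python raises IndexError otherwise,
-- in A inside find and in B at comp[a-1]); index a-1 is valid for the length-n list iff 1-n ≤ a ≤ n.
def Pre_solve (n : Int) (edges : List (Int × Int)) : Prop :=
  ∀ p ∈ edges, (1 - n ≤ p.1 ∧ p.1 ≤ n) ∧ (1 - n ≤ p.2 ∧ p.2 ≤ n)
instance (n : Int) (edges : List (Int × Int)) : Decidable (Pre_solve n edges) := by
  unfold Pre_solve; infer_instance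
def pvWitness_solve : Int × (List (Int × Int)) := (4, [(1, 2), (0, 3), (2, 2)])
def Spec_solve (n : Int) (edges : List (Int × Int)) (out : Int) : Prop := out = solve_alt n edges
instance (n : Int) (edges : List (Int × Int)) (out : Int) : Decidable (Spec_solve n edges out) := by
  unfold Spec_solve; infer_instance

-- ===== CLAIM (what is proved, stated in full; the proofs are below) =====
def Claim_equal_solve : Prop := ∀ (n : Int) (edges : List (Int × Int)), Dom_solve n edges → Pre_solve n edges → Spec_solve n edges (solve n edges)

-- ===== LEMMAS AND PROOFS =====

-- list-level reference versions of the two loop bodies (the proofs work over List,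
-- bridged to the Array ports by the toList lemmas below)
def findL : Nat → List Int → List Int → Int → List Int × Int
  | 0, _, change, _ => (change, 0)
  | fuel+1, pare, change, c =>
    let change' := PySem.Set.add change c
    let p := PySem.List.pyGetD pare c 0
    if p = c ∨ p = -1 then (change', p)
    else findL fuel pare change' p

-- normalized (nonnegative) index of Python index c into a list of length m
def nnode (m : Nat) (c : Int) : Nat := if 0 ≤ c then c.toNat else m - (-c).toNat

theorem pyIdx_eq_nnode (m : Nat) (c : Int) (h1 : -(m:Int) ≤ c) (h2 : c < m) :
    PySem.List.pyIdx? m c = some (nnode m c) := by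
  simp only [PySem.List.pyIdx?, nnode]
  split_ifs
  all_goals rfl

theorem nnode_lt (m : Nat) (c : Int) (h1 : -(m:Int) ≤ c) (h2 : c < m) : nnode m c < m := by
  simp only [nnode]; split_ifs <;> omega

theorem nnode_coe (m : Nat) (j : Nat) (_h : j < m) : nnode m (j : Int) = j := by
  simp [nnode]

theorem pyGetD_nn (l : List Int) (c : Int) (h1 : -(l.length:Int) ≤ c) (h2 : c < l.length) :
    PySem.List.pyGetD l c 0 = l.getD (nnode l.length c) 0 := by
  have hi := pyIdx_eq_nnode l.length c h1 h2
  have hlt := nnode_lt l.length c h1 h2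
  simp [PySem.List.pyGetD, PySem.List.pyGet?, hi, List.getD_eq_getElem?_getD,
        List.getElem?_eq_getElem hlt]

theorem pySetD_nn (l : List Int) (c : Int) (v : Int) (h1 : -(l.length:Int) ≤ c) (h2 : c < l.length) :
    PySem.List.pySetD l c v = l.set (nnode l.length c) v := by
  have hi := pyIdx_eq_nnode l.length c h1 h2
  simp [PySem.List.pySetD, PySem.List.pySet?, hi]

-- the coupled invariant between A's parent array and B's label array
def PUInv (pare comp : List Int) : Prop :=
  comp.length = pare.length ∧
  ∃ f : Nat → Nat,
    ∀ j < pare.length,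
      ((pare.getD j 0 = -1 ∧ comp.getD j 0 = -1) ∨
       (pare.getD j 0 = (j : Int) ∧ comp.getD j 0 = (j : Int)) ∨
       (∃ k : Nat, k < pare.length ∧ pare.getD j 0 = (k : Int) ∧ k ≠ j ∧
          comp.getD j 0 = comp.getD k 0 ∧ f j < f k)) ∧
      (comp.getD j 0 = -1 ∨
       ∃ r : Nat, r < pare.length ∧ comp.getD j 0 = (r : Int) ∧ pare.getD r 0 = (r : Int))

-- frank of a node under the ghost ordering f (used only for fuel sufficiency)
def frank (f : Nat → Nat) (m : Nat) (j : Nat) : Nat :=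
  ((Finset.range m).filter (fun i => f i < f j)).card

theorem frank_lt (f : Nat → Nat) (m : Nat) {j k : Nat} (hj : j < m) (_hk : k < m)
    (h : f j < f k) : frank f m j < frank f m k := by
  apply Finset.card_lt_card
  constructor
  · intro i hi
    simp only [Finset.mem_filter, Finset.mem_range] at hi ⊢
    exact ⟨hi.1, hi.2.trans h⟩
  · intro hsub
    have := hsub (by simp [Finset.mem_filter, Finset.mem_range, hj, h] :
      j ∈ (Finset.range m).filter (fun i => f i < f k))
    simp [Finset.mem_filter] at this
  
theorem frank_le (f : Nat → Nat) (m : Nat) {j : Nat} (hj : j < m) : frank f m j ≤ m - 1 := by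
  have h1 : ((Finset.range m).filter (fun i => f i < f j)) ⊆ (Finset.range m).erase j := by
    intro i hi
    simp only [Finset.mem_filter, Finset.mem_range] at hi
    refine Finset.mem_erase.2 ⟨?_, by simp [Finset.mem_range, hi.1]⟩
    rintro rfl; omega
  have := Finset.card_le_card h1
  rw [Finset.card_erase_of_mem (by simp [Finset.mem_range, hj])] at this
  simpa [frank, Finset.card_range] using this

-- invariant body with an explicit ghost order f
def InvBody (pare comp : List Int) (f : Nat → Nat) : Prop :=
  ∀ j < pare.length,
    ((pare.getD j 0 = -1 ∧ comp.getD j 0 = -1) ∨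
     (pare.getD j 0 = (j : Int) ∧ comp.getD j 0 = (j : Int)) ∨
     (∃ k : Nat, k < pare.length ∧ pare.getD j 0 = (k : Int) ∧ k ≠ j ∧
        comp.getD j 0 = comp.getD k 0 ∧ f j < f k)) ∧
    (comp.getD j 0 = -1 ∨
     ∃ r : Nat, r < pare.length ∧ comp.getD j 0 = (r : Int) ∧ pare.getD r 0 = (r : Int))

-- the loop bodies of the two ports (definitionally the lambdas in solve / solve_alt)
def AStep (pare : List Int) (ab : Int × Int) : List Int :=
  let r1 := findL (pare.length + 1) pare PySem.Set.empty (ab.1 - 1)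
  let r2 := findL (pare.length + 1) pare r1.1 (ab.2 - 1)
  let pa := r1.2
  let pb := r2.2
  let val : Int := if pa = -1 ∨ pb = -1 ∨ pa = pb then -1 else pa
  r2.1.foldl (fun pr ele => PySem.List.pySetD pr ele val) pare

def BStep (comp : List Int) (ab : Int × Int) : List Int :=
  let pa := PySem.List.pyGetD comp (ab.1 - 1) 0
  let pb := PySem.List.pyGetD comp (ab.2 - 1) 0
  let val : Int := if pa = -1 ∨ pb = -1 ∨ pa = pb then -1 else pa
  comp.map (fun c => if c = pa ∨ c = pb then val else c)

theorem findL_succ (fuel : Nat) (pare change : List Int) (c : Int) :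
    findL (fuel + 1) pare change c =
      (if PySem.List.pyGetD pare c 0 = c ∨ PySem.List.pyGetD pare c 0 = -1 then
        (PySem.Set.add change c, PySem.List.pyGetD pare c 0)
      else findL fuel pare (PySem.Set.add change c) (PySem.List.pyGetD pare c 0)) := rfl

-- Array-level loop bodies (definitionally the lambdas in the ports) and toList bridges
def AStepA (pare : Array Int) (ab : Int × Int) : Array Int :=
  let r1 := findA (pare.size + 1) pare PySem.Set.empty (ab.1 - 1)
  let r2 := findA (pare.size + 1) pare r1.1 (ab.2 - 1)
  let pa := r1.2
  let pb := r2.2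
  let val : Int := if pa = -1 ∨ pb = -1 ∨ pa = pb then -1 else pa
  r2.1.foldl (fun pr ele => pyASet pr ele val) pare

def BStepA (comp : Array Int) (ab : Int × Int) : Array Int :=
  let pa := pyAGet comp (ab.1 - 1)
  let pb := pyAGet comp (ab.2 - 1)
  let val : Int := if pa = -1 ∨ pb = -1 ∨ pa = pb then -1 else pa
  comp.map (fun c => if c = pa ∨ c = pb then val else c)

theorem pyAGet_toList (xs : Array Int) (i : Int) :
    pyAGet xs i = PySem.List.pyGetD xs.toList i 0 := by
  have hsz : xs.toList.length = xs.size := by simp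
  unfold pyAGet
  simp only [PySem.List.pyGetD, PySem.List.pyGet?, PySem.List.pyIdx?, hsz]
  by_cases h0 : 0 ≤ i
  · rw [if_pos h0, if_pos h0]
    by_cases hlt : i < (xs.size : Int)
    · rw [if_pos hlt]
      simp [Array.getElem?_toList]
    · rw [if_neg hlt]
      have hnone : xs[i.toNat]? = none := by
        rw [getElem?_neg]
        omega
      simp [hnone]
  · rw [if_neg h0, if_neg h0]
    by_cases hge : -(xs.size : Int) ≤ i
    · rw [if_pos hge, if_pos hge]
      simp [Array.getElem?_toList]
    · rw [if_neg hge, if_neg hge]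
      simp

theorem pyASet_toList (xs : Array Int) (i v : Int) :
    (pyASet xs i v).toList = PySem.List.pySetD xs.toList i v := by
  have hsz : xs.toList.length = xs.size := by simp
  unfold pyASet
  simp only [PySem.List.pySetD, PySem.List.pySet?, PySem.List.pyIdx?, hsz]
  by_cases h0 : 0 ≤ i
  · rw [if_pos h0, if_pos h0]
    by_cases hlt : i < (xs.size : Int)
    · rw [if_pos hlt, if_pos hlt]
      simp [Array.toList_setIfInBounds]
    · rw [if_neg hlt, if_neg hlt]
      simp
  · rw [if_neg h0, if_neg h0]
    by_cases hge : -(xs.size : Int) ≤ i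
    · rw [if_pos hge, if_pos hge]
      simp [Array.toList_setIfInBounds]
    · rw [if_neg hge, if_neg hge]
      simp

theorem findA_eq_findL (fuel : Nat) : ∀ (pare : Array Int) (change : List Int) (c : Int),
    findA fuel pare change c = findL fuel pare.toList change c := by
  induction fuel with
  | zero => intro pare change c; rfl
  | succ fuel ih =>
    intro pare change c
    show (if pyAGet pare c = c ∨ pyAGet pare c = -1 then
        (PySem.Set.add change c, pyAGet pare c)
      else findA fuel pare (PySem.Set.add change c) (pyAGet pare c)) = _
    rw [findL_succ, pyAGet_toList]
    by_cases hc : PySem.List.pyGetD pare.toList c 0 = c ∨ PySem.List.pyGetD pare.toList c 0 = -1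
    · rw [if_pos hc, if_pos hc]
    · rw [if_neg hc, if_neg hc, ih]

theorem setFold_toList (v : Int) (L : List Int) : ∀ (xs : Array Int),
    (L.foldl (fun pr ele => pyASet pr ele v) xs).toList =
      L.foldl (fun pr ele => PySem.List.pySetD pr ele v) xs.toList := by
  induction L with
  | nil => intro xs; rfl
  | cons x t ih =>
    intro xs
    simp only [List.foldl_cons]
    rw [ih, pyASet_toList]

theorem AStepA_toList (pare : Array Int) (ab : Int × Int) :
    (AStepA pare ab).toList = AStep pare.toList ab := by
  unfold AStepA AStep
  dsimp only
  rw [findA_eq_findL, findA_eq_findL, setFold_toList]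
  have hsz : pare.toList.length = pare.size := by simp
  rw [hsz]

theorem BStepA_toList (comp : Array Int) (ab : Int × Int) :
    (BStepA comp ab).toList = BStep comp.toList ab := by
  unfold BStepA BStep
  dsimp only
  rw [pyAGet_toList, pyAGet_toList, Array.toList_map]

theorem foldA_toList (edges : List (Int × Int)) : ∀ (xs : Array Int),
    (edges.foldl AStepA xs).toList = edges.foldl AStep xs.toList := by
  induction edges with
  | nil => intro xs; rfl
  | cons e t ih =>
    intro xs
    simp only [List.foldl_cons]
    rw [ih, AStepA_toList]

theorem foldB_toList (edges : List (Int × Int)) : ∀ (xs : Array Int),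
    (edges.foldl BStepA xs).toList = edges.foldl BStep xs.toList := by
  induction edges with
  | nil => intro xs; rfl
  | cons e t ih =>
    intro xs
    simp only [List.foldl_cons]
    rw [ih, BStepA_toList]

theorem findL_spec (pare comp : List Int) (f : Nat → Nat)
    (hI : InvBody pare comp f) :
    ∀ (fuel : Nat) (c : Int) (change : List Int),
      -(pare.length : Int) ≤ c → c < pare.length →
      pare.length ≤ fuel + frank f pare.length (nnode pare.length c) →
      ∃ P : List Int,
        findL (fuel + 1) pare change c =
          (List.foldl PySem.Set.add change P, comp.getD (nnode pare.length c) 0) ∧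
        (∀ x ∈ P, -(pare.length : Int) ≤ x ∧ x < pare.length ∧
           comp.getD (nnode pare.length x) 0 = comp.getD (nnode pare.length c) 0) ∧
        (∀ r : Nat, r < pare.length → comp.getD (nnode pare.length c) 0 = (r : Int) →
           (r : Int) ∈ P) := by
  intro fuel
  induction fuel with
  | zero =>
    intro c change h1 h2 hf
    exfalso
    have hj := nnode_lt pare.length c h1 h2
    have hle := frank_le f pare.length hj
    omega
  | succ fuel ih =>
    intro c change h1 h2 hf
    have hj : nnode pare.length c < pare.length := nnode_lt _ _ h1 h2
    have hp : PySem.List.pyGetD pare c 0 = pare.getD (nnode pare.length c) 0 :=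
      pyGetD_nn pare c h1 h2
    obtain ⟨C1, C2⟩ := hI (nnode pare.length c) hj
    rcases C1 with ⟨hpj, hcj⟩ | ⟨hpj, hcj⟩ | ⟨k, hk, hpj, hkj, hcj, hfk⟩
    · -- parent is -1: return -1 immediately
      refine ⟨[c], ?_, ?_, ?_⟩
      · rw [findL_succ, if_pos (Or.inr (hp.trans hpj))]
        simp only [List.foldl_cons, List.foldl_nil]
        exact Prod.ext_iff.2 ⟨rfl, by rw [hp, hpj, hcj]⟩
      · intro x hx
        rcases List.mem_singleton.1 hx with rfl
        exact ⟨h1, h2, rfl⟩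
      · intro r hr hcr
        rw [hcj] at hcr
        exfalso; omega
    · -- parent is the node itself: a root
      by_cases hc0 : 0 ≤ c
      · have hcast : ((nnode pare.length c : Nat) : Int) = c := by
          simp [nnode, hc0, Int.toNat_of_nonneg hc0]
        refine ⟨[c], ?_, ?_, ?_⟩
        · rw [findL_succ, if_pos (Or.inl (by rw [hp, hpj, hcast]))]
          simp only [List.foldl_cons, List.foldl_nil]
          exact Prod.ext_iff.2 ⟨rfl, by rw [hp, hpj, hcj]⟩
        · intro x hx
          rcases List.mem_singleton.1 hx with rfl
          exact ⟨h1, h2, rfl⟩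
        · intro r hr hcr
          rw [hcj] at hcr
          have : r = nnode pare.length c := by exact_mod_cast hcr.symm
          rw [this, hcast]; exact List.mem_singleton.2 rfl
      · -- negative raw index naming a root: one extra recursion step, then stop
        have hcneg : ¬ ((nnode pare.length c : Nat) : Int) = c := by
          intro hcc; omega
        have hnn : nnode pare.length ((nnode pare.length c : Nat) : Int) =
            nnode pare.length c := nnode_coe _ _ hj
        have hp2 : PySem.List.pyGetD pare ((nnode pare.length c : Nat) : Int) 0 =
            pare.getD (nnode pare.length c) 0 := by
          rw [pyGetD_nn pare _ (by omega) (by exact_mod_cast hj), hnn]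
        refine ⟨[c, ((nnode pare.length c : Nat) : Int)], ?_, ?_, ?_⟩
        · rw [findL_succ, if_neg (by
            rw [hp, hpj]
            rintro (hcc | hm1)
            · exact hcneg hcc
            · omega)]
          rw [hp, hpj, findL_succ, if_pos (Or.inl (by rw [hp2, hpj]))]
          simp only [List.foldl_cons, List.foldl_nil]
          exact Prod.ext_iff.2 ⟨rfl, by dsimp only; rw [hp2, hpj, hcj]⟩
        · intro x hx
          rcases List.mem_cons.1 hx with rfl | hx'
          · exact ⟨h1, h2, rfl⟩
          · rcases List.mem_singleton.1 hx' with rfl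
            exact ⟨by omega, by exact_mod_cast hj, by rw [hnn]⟩
        · intro r hr hcr
          rw [hcj] at hcr
          have : r = nnode pare.length c := by exact_mod_cast hcr.symm
          subst this
          exact List.mem_cons.2 (Or.inr (List.mem_singleton.2 rfl))
    · -- proper parent: recurse
      have hkb1 : -(pare.length : Int) ≤ (k : Int) := by omega
      have hkb2 : ((k : Int)) < pare.length := by exact_mod_cast hk
      have hnnk : nnode pare.length ((k : Int)) = k := nnode_coe _ _ hk
      have hrank := frank_lt f pare.length hj hk hfk
      obtain ⟨P', heq, hPp, hroot⟩ := ih (k : Int) (PySem.Set.add change c) hkb1 hkb2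
        (by rw [hnnk]; omega)
      rw [hnnk] at heq hPp hroot
      refine ⟨c :: P', ?_, ?_, ?_⟩
      · rw [findL_succ, if_neg (by
          rw [hp, hpj]
          rintro (hcc | hm1)
          · by_cases hc0 : 0 ≤ c
            · have : nnode pare.length c = c.toNat := by simp [nnode, hc0]
              omega
            · omega
          · omega)]
        rw [hp, hpj, List.foldl_cons, heq, hcj]
      · intro x hx
        rcases List.mem_cons.1 hx with rfl | hx'
        · exact ⟨h1, h2, rfl⟩
        · obtain ⟨hxb1, hxb2, hxc⟩ := hPp x hx'
          exact ⟨hxb1, hxb2, by rw [hxc, ← hcj]⟩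
      · intro r hr hcr
        rw [hcj] at hcr
        exact List.mem_cons.2 (Or.inr (hroot r hr hcr))

theorem upd_spec (val : Int) (L : List Int) :
    ∀ (pare : List Int),
      (∀ x ∈ L, -(pare.length : Int) ≤ x ∧ x < pare.length) →
      (L.foldl (fun pr ele => PySem.List.pySetD pr ele val) pare).length = pare.length ∧
      ∀ j < pare.length,
        (L.foldl (fun pr ele => PySem.List.pySetD pr ele val) pare).getD j 0 =
          if ∃ x ∈ L, nnode pare.length x = j then val else pare.getD j 0 := by
  induction L with
  | nil => intro pare _; exact ⟨rfl, fun j hj => by simp⟩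
  | cons x t ih =>
    intro pare hb
    have hx := hb x (by simp)
    have hset : PySem.List.pySetD pare x val = pare.set (nnode pare.length x) val :=
      pySetD_nn pare x val hx.1 hx.2
    have hlen1 : (pare.set (nnode pare.length x) val).length = pare.length := by simp
    obtain ⟨ih1, ih2⟩ := ih (pare.set (nnode pare.length x) val)
      (by intro y hy; rw [hlen1]; exact hb y (List.mem_cons_of_mem _ hy))
    constructor
    · simpa [hset, hlen1] using ih1
    · intro j hj
      have hj' : j < (pare.set (nnode pare.length x) val).length := by omega
      have := ih2 j hj'
      simp only [List.foldl_cons, hset]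
      rw [this]
      have hgs : (pare.set (nnode pare.length x) val).getD j 0 =
          if nnode pare.length x = j then val else pare.getD j 0 := by
        by_cases hxy : nnode pare.length x = j
        · subst hxy
          rw [if_pos rfl, List.getD_eq_getElem?_getD, List.getElem?_set_self (by omega)]
          simp
        · rw [if_neg hxy, List.getD_eq_getElem?_getD, List.getElem?_set_ne hxy,
              List.getD_eq_getElem?_getD]
      rw [hlen1, hgs]
      have hconsp : (∃ y ∈ x :: t, nnode pare.length y = j) ↔
          (nnode pare.length x = j ∨ ∃ y ∈ t, nnode pare.length y = j) := by
        constructor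
        · rintro ⟨y, hy, hyy⟩
          rcases List.mem_cons.1 hy with rfl | hy'
          · exact Or.inl hyy
          · exact Or.inr ⟨y, hy', hyy⟩
        · rintro (h | ⟨y, hy, hyy⟩)
          · exact ⟨x, by simp, h⟩
          · exact ⟨y, by simp [hy], hyy⟩
      by_cases h1 : ∃ y ∈ t, nnode pare.length y = j
      · rw [if_pos h1, if_pos (hconsp.2 (Or.inr h1))]
      · rw [if_neg h1]
        by_cases h2 : nnode pare.length x = j
        · rw [if_pos h2, if_pos (hconsp.2 (Or.inl h2))]
        · rw [if_neg h2, if_neg (fun hc => (hconsp.1 hc).elim h2 h1)]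

theorem mem_update_iff (s : List Int) (L : List Int) (x : Int) :
    x ∈ List.foldl PySem.Set.add s L ↔ x ∈ s ∨ x ∈ L := by
  induction L generalizing s with
  | nil => simp
  | cons y t ih =>
    simp only [List.foldl_cons, ih, PySem.Set.mem_add, List.mem_cons]
    tauto

theorem getD_map_lt (comp : List Int) (g : Int → Int) (j : Nat) (h : j < comp.length) :
    (comp.map g).getD j 0 = g (comp.getD j 0) := by
  rw [List.getD_eq_getElem?_getD, List.getD_eq_getElem?_getD,
      List.getElem?_eq_getElem (by simpa using h), List.getElem?_eq_getElem h]
  simp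

theorem step_inv (pare comp : List Int) (a b : Int)
    (h : PUInv pare comp)
    (ha1 : -(pare.length : Int) ≤ a - 1) (ha2 : a - 1 < pare.length)
    (hb1 : -(pare.length : Int) ≤ b - 1) (hb2 : b - 1 < pare.length) :
    PUInv (AStep pare (a, b)) (BStep comp (a, b)) ∧
      (AStep pare (a, b)).length = pare.length := by
  obtain ⟨hm, f, hI⟩ := h
  obtain ⟨P₁, heq1, hP1, hroot1⟩ := findL_spec pare comp f hI pare.length (a-1)
    PySem.Set.empty ha1 ha2 (by omega)
  obtain ⟨P₂, heq2, hP2, hroot2⟩ := findL_spec pare comp f hI pare.length (b-1)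
    (List.foldl PySem.Set.add PySem.Set.empty P₁) hb1 hb2 (by omega)
  have hja : nnode pare.length (a-1) < pare.length := nnode_lt _ _ ha1 ha2
  have hjb : nnode pare.length (b-1) < pare.length := nnode_lt _ _ hb1 hb2
  -- short names
  set ja := nnode pare.length (a-1) with hjadef
  set jb := nnode pare.length (b-1) with hjbdef
  set pa := comp.getD ja 0 with hpadef
  set pb := comp.getD jb 0 with hpbdef
  set val : Int := if pa = -1 ∨ pb = -1 ∨ pa = pb then -1 else pa with hvaldef
  set L : List Int := List.foldl PySem.Set.add (List.foldl PySem.Set.add PySem.Set.empty P₁) P₂ with hLdef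
  have hA : AStep pare (a, b) = L.foldl (fun pr ele => PySem.List.pySetD pr ele val) pare := by
    unfold AStep
    dsimp only
    rw [heq1, heq2]
  have hpa' : PySem.List.pyGetD comp (a-1) 0 = pa := by
    rw [pyGetD_nn comp (a-1) (by rw [hm]; exact ha1) (by rw [hm]; exact ha2), hm, hpadef, hjadef]
  have hpb' : PySem.List.pyGetD comp (b-1) 0 = pb := by
    rw [pyGetD_nn comp (b-1) (by rw [hm]; exact hb1) (by rw [hm]; exact hb2), hm, hpbdef, hjbdef]
  have hB : BStep comp (a, b) = comp.map (fun c => if c = pa ∨ c = pb then val else c) := by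
    unfold BStep
    dsimp only
    rw [hpa', hpb']
  have hLmem : ∀ x : Int, x ∈ L ↔ x ∈ P₁ ∨ x ∈ P₂ := by
    intro x
    rw [hLdef, mem_update_iff, mem_update_iff]
    simp [PySem.Set.empty]
  have hLb : ∀ x ∈ L, -(pare.length : Int) ≤ x ∧ x < pare.length := by
    intro x hx
    rcases (hLmem x).1 hx with hx1 | hx2
    · exact ⟨(hP1 x hx1).1, (hP1 x hx1).2.1⟩
    · exact ⟨(hP2 x hx2).1, (hP2 x hx2).2.1⟩
  obtain ⟨hlen', hupd⟩ := upd_spec val L pare hLb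
  have hCondLabel : ∀ j < pare.length, (∃ x ∈ L, nnode pare.length x = j) →
      comp.getD j 0 = pa ∨ comp.getD j 0 = pb := by
    rintro j hj ⟨x, hx, rfl⟩
    rcases (hLmem x).1 hx with hx1 | hx2
    · exact Or.inl ((hP1 x hx1).2.2)
    · exact Or.inr ((hP2 x hx2).2.2)
  have root_self : ∀ r : Nat, r < pare.length → pare.getD r 0 = (r : Int) →
      comp.getD r 0 = (r : Int) := by
    intro r hr hpr
    rcases (hI r hr).1 with ⟨h1', _⟩ | ⟨_, h2'⟩ | ⟨k, _, h1', hk2, _, _⟩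
    · rw [hpr] at h1'; exfalso; omega
    · exact h2'
    · exfalso
      rw [hpr] at h1'
      have : r = k := by exact_mod_cast h1'
      exact hk2 this.symm
  have hpaR : pa ≠ -1 → ∃ ra : Nat, ra < pare.length ∧ pa = (ra : Int) ∧
      pare.getD ra 0 = (ra : Int) ∧ comp.getD ra 0 = (ra : Int) ∧
      (∃ x ∈ L, nnode pare.length x = ra) := by
    intro hne
    rcases (hI ja hja).2 with hceq | ⟨ra, hra, hceq, hpr⟩
    · exact absurd hceq hne
    · refine ⟨ra, hra, hceq, hpr, root_self ra hra hpr, ⟨(ra : Int), ?_, nnode_coe _ _ hra⟩⟩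
      exact (hLmem _).2 (Or.inl (hroot1 ra hra hceq))
  have hpbR : pb ≠ -1 → ∃ rb : Nat, rb < pare.length ∧ pb = (rb : Int) ∧
      pare.getD rb 0 = (rb : Int) ∧ comp.getD rb 0 = (rb : Int) ∧
      (∃ x ∈ L, nnode pare.length x = rb) := by
    intro hne
    rcases (hI jb hjb).2 with hceq | ⟨rb, hrb, hceq, hpr⟩
    · exact absurd hceq hne
    · refine ⟨rb, hrb, hceq, hpr, root_self rb hrb hpr, ⟨(rb : Int), ?_, nnode_coe _ _ hrb⟩⟩
      exact (hLmem _).2 (Or.inr (hroot2 rb hrb hceq))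
  -- getter characterizations of the new states
  have hget' : ∀ j < pare.length, (AStep pare (a, b)).getD j 0 =
      if ∃ x ∈ L, nnode pare.length x = j then val else pare.getD j 0 := by
    intro j hj; rw [hA]; exact hupd j hj
  have hcget' : ∀ j < pare.length, (BStep comp (a, b)).getD j 0 =
      (if comp.getD j 0 = pa ∨ comp.getD j 0 = pb then val else comp.getD j 0) := by
    intro j hj
    rw [hB, getD_map_lt comp _ j (by omega)]
  have hAlen : (AStep pare (a, b)).length = pare.length := by rw [hA]; exact hlen'
  have hBlen : (BStep comp (a, b)).length = pare.length := by
    rw [hB, List.length_map, hm]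
  refine ⟨⟨by rw [hAlen, hBlen], ?_⟩, hAlen⟩
  by_cases hw : pa = -1 ∨ pb = -1 ∨ pa = pb
  · -- val = -1 : the merged component is marked cyclic; ghost order unchanged
    have hval : val = -1 := by rw [hvaldef, if_pos hw]
    refine ⟨f, ?_⟩
    intro j hj
    rw [hAlen] at hj
    simp only [hAlen]
    have hg := hget' j hj
    have hc := hcget' j hj
    by_cases hcond : ∃ x ∈ L, nnode pare.length x = j
    · rw [if_pos hcond] at hg
      rw [if_pos (hCondLabel j hj hcond)] at hc
      exact ⟨Or.inl ⟨by rw [hg, hval], by rw [hc, hval]⟩, Or.inl (by rw [hc, hval])⟩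
    · rw [if_neg hcond] at hg
      obtain ⟨C1, C2⟩ := hI j hj
      have hjnotpa : comp.getD j 0 = (j : Int) → ¬ ((j : Int) = pa) := by
        intro hcjj hjeq
        have hne : pa ≠ -1 := by rw [← hjeq]; omega
        obtain ⟨ra, hra, hpara, _, _, hCra⟩ := hpaR hne
        have hjr : ((j : Nat) : Int) = ((ra : Nat) : Int) := by rw [hjeq, hpara]
        have : j = ra := by exact_mod_cast hjr
        exact hcond (this ▸ hCra)
      have hjnotpb : comp.getD j 0 = (j : Int) → ¬ ((j : Int) = pb) := by
        intro hcjj hjeq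
        have hne : pb ≠ -1 := by rw [← hjeq]; omega
        obtain ⟨rb, hrb, hparb, _, _, hCrb⟩ := hpbR hne
        have hjr : ((j : Nat) : Int) = ((rb : Nat) : Int) := by rw [hjeq, hparb]
        have : j = rb := by exact_mod_cast hjr
        exact hcond (this ▸ hCrb)
      have hm1 : (if (-1 : Int) = pa ∨ (-1 : Int) = pb then val else (-1 : Int)) = -1 := by
        by_cases hmm : (-1 : Int) = pa ∨ (-1 : Int) = pb
        · rw [if_pos hmm, hval]
        · rw [if_neg hmm]
      constructor
      · rcases C1 with ⟨h1', h2'⟩ | ⟨h1', h2'⟩ | ⟨k, hk, h1', hk2, h3', h4'⟩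
        · exact Or.inl ⟨by rw [hg, h1'], by rw [hc, h2', hm1]⟩
        · refine Or.inr (Or.inl ⟨by rw [hg, h1'], ?_⟩)
          rw [hc, h2', if_neg ?_]
          rintro (hx | hx)
          · exact hjnotpa h2' hx
          · exact hjnotpb h2' hx
        · refine Or.inr (Or.inr ⟨k, hk, by rw [hg, h1'], hk2, ?_, h4'⟩)
          rw [hc, hcget' k hk, h3']
      · rcases C2 with hjm1 | ⟨r, hr, hcr, hpr⟩
        · exact Or.inl (by rw [hc, hjm1, hm1])
        · by_cases hin : comp.getD j 0 = pa ∨ comp.getD j 0 = pb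
          · exact Or.inl (by rw [hc, if_pos hin, hval])
          · have hcj' : (BStep comp (a, b)).getD j 0 = (r : Int) := by
              rw [hc, if_neg hin, hcr]
            have hnotCr : ¬ ∃ x ∈ L, nnode pare.length x = r := by
              intro hCr
              have := hCondLabel r hr hCr
              rw [root_self r hr hpr, ← hcr] at this
              exact hin this
            refine Or.inr ⟨r, hr, hcj', ?_⟩
            rw [hget' r hr, if_neg hnotCr, hpr]
  · -- val = pa : the two components are merged under root ra = pa
    have hval : val = pa := by rw [hvaldef, if_neg hw]
    have hpane : pa ≠ -1 := fun hh => hw (Or.inl hh)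
    have hpbne : pb ≠ -1 := fun hh => hw (Or.inr (Or.inl hh))
    obtain ⟨ra, hra, hpara, hprra, hcra, hCra⟩ := hpaR hpane
    set N := (Finset.range pare.length).sup f with hNdef
    have hfle : ∀ x, x < pare.length → f x ≤ N :=
      fun x hx => Finset.le_sup (Finset.mem_range.2 hx)
    refine ⟨fun x => if (x : Int) = pa then N + 1 else f x, ?_⟩
    intro j hj
    rw [hAlen] at hj
    simp only [hAlen]
    have hg := hget' j hj
    have hc := hcget' j hj
    have hf'ra : (if ((ra : Nat) : Int) = pa then N + 1 else f ra) = N + 1 := by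
      rw [if_pos hpara.symm]
    have hf'other : ∀ x : Nat, x ≠ ra → (if ((x : Nat) : Int) = pa then N + 1 else f x) = f x := by
      intro x hx
      have hne : ¬ ((x : Int) = pa) := by
        intro hh
        rw [hpara] at hh
        exact hx (by exact_mod_cast hh)
      rw [if_neg hne]
    have hpare'ra : (AStep pare (a, b)).getD ra 0 = (ra : Int) := by
      rw [hget' ra hra, if_pos hCra, hval, hpara]
    have hcomp'ra : (BStep comp (a, b)).getD ra 0 = (ra : Int) := by
      rw [hcget' ra hra, if_pos (Or.inl (by rw [hcra, hpara])), hval, hpara]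
    by_cases hcond : ∃ x ∈ L, nnode pare.length x = j
    · rw [if_pos hcond] at hg
      rw [if_pos (hCondLabel j hj hcond)] at hc
      by_cases hjra : j = ra
      · subst hjra
        exact ⟨Or.inr (Or.inl ⟨by rw [hg, hval, hpara], by rw [hc, hval, hpara]⟩),
               Or.inr ⟨j, hj, by rw [hc, hval, hpara], by rw [hpare'ra]⟩⟩
      · refine ⟨Or.inr (Or.inr ⟨ra, hra, by rw [hg, hval, hpara], fun hh => hjra hh.symm,
          ?_, ?_⟩), Or.inr ⟨ra, hra, by rw [hc, hval, hpara], hpare'ra⟩⟩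
        · rw [hc, hcomp'ra, hval, hpara]
        · rw [hf'ra, hf'other j hjra]
          exact Nat.lt_succ_of_le (hfle j hj)
    · rw [if_neg hcond] at hg
      obtain ⟨C1, C2⟩ := hI j hj
      have hjra : j ≠ ra := by
        intro hh
        exact hcond (hh ▸ hCra)
      have hnm : ¬ ((-1 : Int) = pa ∨ (-1 : Int) = pb) := by
        rintro (hx | hx)
        · exact hpane hx.symm
        · exact hpbne hx.symm
      have hm1 : (if (-1 : Int) = pa ∨ (-1 : Int) = pb then val else (-1 : Int)) = -1 := by
        rw [if_neg hnm]
      have hjnotpa : comp.getD j 0 = (j : Int) → ¬ ((j : Int) = pa) := by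
        intro _ hjeq
        have hjr : ((j : Nat) : Int) = ((ra : Nat) : Int) := by rw [hjeq, hpara]
        exact hjra (by exact_mod_cast hjr)
      have hjnotpb : comp.getD j 0 = (j : Int) → ¬ ((j : Int) = pb) := by
        intro hcjj hjeq
        obtain ⟨rb, hrb, hparb, _, _, hCrb⟩ := hpbR hpbne
        have hjr : ((j : Nat) : Int) = ((rb : Nat) : Int) := by rw [hjeq, hparb]
        have : j = rb := by exact_mod_cast hjr
        exact hcond (this ▸ hCrb)
      constructor
      · rcases C1 with ⟨h1', h2'⟩ | ⟨h1', h2'⟩ | ⟨k, hk, h1', hk2, h3', h4'⟩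
        · exact Or.inl ⟨by rw [hg, h1'], by rw [hc, h2', hm1]⟩
        · refine Or.inr (Or.inl ⟨by rw [hg, h1'], ?_⟩)
          rw [hc, h2', if_neg ?_]
          rintro (hx | hx)
          · exact hjnotpa h2' hx
          · exact hjnotpb h2' hx
        · refine Or.inr (Or.inr ⟨k, hk, by rw [hg, h1'], hk2, ?_, ?_⟩)
          · rw [hc, hcget' k hk, h3']
          · rw [hf'other j hjra]
            by_cases hkra : k = ra
            · subst hkra
              rw [hf'ra]
              exact Nat.lt_succ_of_le (hfle j hj)
            · rw [hf'other k hkra]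
              exact h4'
      · rcases C2 with hjm1 | ⟨r, hr, hcr, hpr⟩
        · exact Or.inl (by rw [hc, hjm1, hm1])
        · by_cases hin : comp.getD j 0 = pa ∨ comp.getD j 0 = pb
          · refine Or.inr ⟨ra, hra, ?_, hpare'ra⟩
            rw [hc, if_pos hin, hval, hpara]
          · have hnotCr : ¬ ∃ x ∈ L, nnode pare.length x = r := by
              intro hCr
              have := hCondLabel r hr hCr
              rw [root_self r hr hpr, ← hcr] at this
              exact hin this
            refine Or.inr ⟨r, hr, by rw [hc, if_neg hin, hcr], ?_⟩
            rw [hget' r hr, if_neg hnotCr, hpr]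

theorem fold_inv (edges : List (Int × Int)) :
    ∀ pare comp, PUInv pare comp →
      (∀ p ∈ edges, -(pare.length : Int) ≤ p.1 - 1 ∧ p.1 - 1 < pare.length ∧
                    -(pare.length : Int) ≤ p.2 - 1 ∧ p.2 - 1 < pare.length) →
      PUInv (edges.foldl AStep pare) (edges.foldl BStep comp) ∧
        (edges.foldl AStep pare).length = pare.length := by
  induction edges with
  | nil => intro pare comp h _; exact ⟨h, rfl⟩
  | cons e t ih =>
    intro pare comp h hb
    obtain ⟨h', hlen⟩ := step_inv pare comp e.1 e.2 h
      (hb e (by simp)).1 (hb e (by simp)).2.1 (hb e (by simp)).2.2.1 (hb e (by simp)).2.2.2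
    have hcl : (BStep comp e).length = (AStep pare (e.1, e.2)).length := h'.1
    obtain ⟨hres, hlen2⟩ := ih (AStep pare (e.1, e.2)) (BStep comp e)
      h' (by intro p hp; rw [hlen]; exact hb p (List.mem_cons_of_mem _ hp))
    constructor
    · simpa using hres
    · simpa [hlen] using hlen2

theorem solve_spec_aux : ∀ (n : Int) (edges : List (Int × Int)),
    Pre_solve n edges → solve n edges = solve_alt n edges := by
  intro n edges hpre
  have htl : (PySem.List.pyRange 0 n 1).toArray.toList = PySem.List.pyRange 0 n 1 := by simp
  have hsolve : solve n edges = (PySem.List.pyRange 0 n 1).foldl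
      (fun ret i => if i = PySem.List.pyGetD
        (edges.foldl AStep (PySem.List.pyRange 0 n 1)) i 0 then ret + 1 else ret) 0 := by
    show (PySem.List.pyRange 0 n 1).foldl
      (fun ret i => if i = pyAGet (edges.foldl AStepA (PySem.List.pyRange 0 n 1).toArray) i
        then ret + 1 else ret) 0 = _
    refine PySem.List.foldl_congr_mem _ _ _ 0 ?_
    intro acc i _
    rw [pyAGet_toList, foldA_toList, htl]
  have hsalt : solve_alt n edges = (PySem.List.pyRange 0 n 1).foldl
      (fun acc i => if PySem.List.pyGetD
        (edges.foldl BStep (PySem.List.pyRange 0 n 1)) i 0 = i then acc + 1 else acc) 0 := by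
    show (PySem.List.pyRange 0 n 1).foldl
      (fun acc i => if pyAGet (edges.foldl BStepA (PySem.List.pyRange 0 n 1).toArray) i = i
        then acc + 1 else acc) 0 = _
    refine PySem.List.foldl_congr_mem _ _ _ 0 ?_
    intro acc i _
    rw [pyAGet_toList, foldB_toList, htl]
  have hRget : ∀ j, (hj : j < (PySem.List.pyRange 0 n 1).length) →
      (PySem.List.pyRange 0 n 1).getD j 0 = (j : Int) := by
    intro j hj
    rw [List.getD_eq_getElem?_getD, List.getElem?_eq_getElem hj]
    have := PySem.List.getElem_pyRange_one 0 n j hj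
    simp only [this, zero_add, Option.getD_some]
  set R := PySem.List.pyRange 0 n 1 with hR
  have hRlen : R.length = (n - 0).toNat := PySem.List.length_pyRange_one 0 n
  have hinit : PUInv R R := by
    refine ⟨rfl, fun _ => 0, ?_⟩
    intro j hj
    exact ⟨Or.inr (Or.inl ⟨hRget j hj, hRget j hj⟩), Or.inr ⟨j, hj, hRget j hj, hRget j hj⟩⟩
  have hbnds : ∀ p ∈ edges, -(R.length : Int) ≤ p.1 - 1 ∧ p.1 - 1 < R.length ∧
      -(R.length : Int) ≤ p.2 - 1 ∧ p.2 - 1 < R.length := by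
    intro p hp
    obtain ⟨⟨h1, h2⟩, h3, h4⟩ := hpre p hp
    have hn1 : 1 ≤ n := by omega
    have hcast : (R.length : Int) = n := by rw [hRlen]; omega
    omega
  obtain ⟨hInvF, hlenF⟩ := fold_inv edges R R hinit hbnds
  obtain ⟨hmF, fF, hIF⟩ := hInvF
  set pareF := edges.foldl AStep R with hpareF
  set compF := edges.foldl BStep R with hcompF
  rw [hsolve, hsalt]
  refine PySem.List.foldl_congr_mem R _ _ 0 ?_
  intro acc i hi
  obtain ⟨hi0, hin⟩ := PySem.List.mem_pyRange_one.1 hi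
  have hnlen : (R.length : Int) = n := by
    have h1 : 1 ≤ n := by omega
    rw [hRlen]; omega
  have hib1 : -(pareF.length : Int) ≤ i := by rw [hlenF]; omega
  have hib2 : i < (pareF.length : Int) := by rw [hlenF]; omega
  have hgA : PySem.List.pyGetD pareF i 0 = pareF.getD (nnode pareF.length i) 0 :=
    pyGetD_nn pareF i hib1 hib2
  have hgB : PySem.List.pyGetD compF i 0 = compF.getD (nnode pareF.length i) 0 := by
    rw [pyGetD_nn compF i (by rw [hmF]; exact hib1) (by rw [hmF]; exact hib2), hmF]
  have hji : ((nnode pareF.length i : Nat) : Int) = i := by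
    simp [nnode, hi0, Int.toNat_of_nonneg hi0]
  set j := nnode pareF.length i with hjdef
  have hj : j < pareF.length := nnode_lt _ _ hib1 hib2
  obtain ⟨C1, C2⟩ := hIF j hj
  have key : pareF.getD j 0 = (j : Int) ↔ compF.getD j 0 = (j : Int) := by
    constructor
    · intro hh
      rcases C1 with ⟨h1', h2'⟩ | ⟨h1', h2'⟩ | ⟨k, hk, h1', hk2, h3', h4'⟩
      · rw [hh] at h1'; exfalso; omega
      · exact h2'
      · exfalso
        rw [hh] at h1'
        have : j = k := by exact_mod_cast h1'
        exact hk2 this.symm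
    · intro hh
      rcases C2 with hh2 | ⟨r, hr, hcr, hpr⟩
      · rw [hh] at hh2; exfalso; omega
      · rw [hh] at hcr
        have : r = j := by exact_mod_cast hcr.symm
        rw [← this]; exact hpr
  by_cases hcase : pareF.getD j 0 = (j : Int)
  · rw [if_pos (by rw [hgA, hcase, hji]), if_pos (by rw [hgB, key.1 hcase, hji])]
  · rw [if_neg (by rw [hgA]; intro hh; exact hcase (by rw [← hh, hji])),
        if_neg (by rw [hgB]; intro hh; exact hcase (key.2 (by rw [← hji] at hh; exact hh)))]

-- ===== VERDICT (by name: the statement is the Claim_ definition above) =====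
theorem solve_spec : Claim_equal_solve := by
  intro n edges _ hpre
  exact solve_spec_aux n edges hpre
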